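-- pv_equiv track=rewrite | github.com/offkrse/tg-par-vk | bot_master.py | broker_channel_group
-- ===== SOURCE A (Python) =====
-- def broker_channel_group(cid: str, day_number: int) -> str:
--     """Определяет название TXT файла по channel_id"""
--     cid = str(cid)
--     mapping = {
--         "КР ДОП_3": [915, 917, 918, 919],
--         "КР 1": [12063],
--         "КР 2": [11896],
--         "КР ДОП_4": [3587, 7389, 7553, 8614, 8732],
--         "КР ДОП_5": [9189, 9190, 9191, 9192, 9193, 9194, 9413, 9441, 9443, 9453, 9889, 9899],
--         "КР ДОП_6": [10141, 10240, 11682, 11729],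
--         "КР ДОП_8": [12873],
--         "КР ДОП_9": [16263],
--     }
--     for name, ids in mapping.items():
--         if cid is None:
--             continue
--         if str(cid).isdigit() and int(cid) in ids:
--             return f"{name} ({day_number}).txt"
--     return f"КР ДОП_10 ({day_number}).txt"
-- ===== SOURCE B (Python) =====
-- _INV = {
--     915: "КР ДОП_3", 917: "КР ДОП_3", 918: "КР ДОП_3", 919: "КР ДОП_3",
--     12063: "КР 1",
--     11896: "КР 2",
--     3587: "КР ДОП_4", 7389: "КР ДОП_4", 7553: "КР ДОП_4", 8614: "КР ДОП_4", 8732: "КР ДОП_4",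
--     9189: "КР ДОП_5", 9190: "КР ДОП_5", 9191: "КР ДОП_5", 9192: "КР ДОП_5", 9193: "КР ДОП_5",
--     9194: "КР ДОП_5", 9413: "КР ДОП_5", 9441: "КР ДОП_5", 9443: "КР ДОП_5", 9453: "КР ДОП_5",
--     9889: "КР ДОП_5", 9899: "КР ДОП_5",
--     10141: "КР ДОП_6", 10240: "КР ДОП_6", 11682: "КР ДОП_6", 11729: "КР ДОП_6",
--     12873: "КР ДОП_8",
--     16263: "КР ДОП_9",
-- }
--
-- def broker_channel_group(cid: str, day_number: int) -> str:
--     cid = str(cid)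
--     group = _INV.get(int(cid), "КР ДОП_10") if cid.isdigit() else "КР ДОП_10"
--     return f"{group} ({day_number}).txt"
-- ===== Notes on version B (the rewrite author's own statement) =====
-- stated objective: simpler
-- what changed: Replaces the per-group loop with repeated list-membership scans (and its dead 'cid is None' branch) by one precomputed inverted id->group dict and a single .get probe after the isdigit gate.
import Mathlib
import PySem

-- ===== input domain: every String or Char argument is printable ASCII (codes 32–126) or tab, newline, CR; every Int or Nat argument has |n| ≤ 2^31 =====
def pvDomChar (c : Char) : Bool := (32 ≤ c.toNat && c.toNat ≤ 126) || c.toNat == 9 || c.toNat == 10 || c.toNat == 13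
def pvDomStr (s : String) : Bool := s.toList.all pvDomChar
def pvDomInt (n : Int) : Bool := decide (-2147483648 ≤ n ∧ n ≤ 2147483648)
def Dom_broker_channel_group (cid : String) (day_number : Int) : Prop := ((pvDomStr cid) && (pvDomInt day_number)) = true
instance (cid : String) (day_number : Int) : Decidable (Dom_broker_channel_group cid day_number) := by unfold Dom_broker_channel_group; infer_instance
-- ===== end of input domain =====

-- B replaces A's per-group loop over a name→ids table by one inverted id→group dict probe (simpler).

-- ===== PORT A =====
-- the mapping dict of A, in insertion order
def pvTableA : List (String × List Int) :=
  [("КР ДОП_3", [915, 917, 918, 919]),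
   ("КР 1", [12063]),
   ("КР 2", [11896]),
   ("КР ДОП_4", [3587, 7389, 7553, 8614, 8732]),
   ("КР ДОП_5", [9189, 9190, 9191, 9192, 9193, 9194, 9413, 9441, 9443, 9453, 9889, 9899]),
   ("КР ДОП_6", [10141, 10240, 11682, 11729]),
   ("КР ДОП_8", [12873]),
   ("КР ДОП_9", [16263])]

-- the for-loop over mapping.items(); the Python 'if cid is None: continue' branch is dead
-- (cid : str is never None after str(cid)) and contributes nothing to the result.
def pvLoopA (cid : String) (day_number : Int) : List (String × List Int) → String
  | [] => "КР ДОП_10 (" ++ PySem.Int.toStr day_number ++ ").txt"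
  | (name, ids) :: rest =>
      if PySem.Str.strIsdigit cid &&
         (match PySem.Int.ofStr? cid with
          | some n => ids.contains n
          | none => false) then
        name ++ " (" ++ PySem.Int.toStr day_number ++ ").txt"
      else pvLoopA cid day_number rest

def broker_channel_group (cid : String) (day_number : Int) : String :=
  pvLoopA cid day_number pvTableA

-- ===== PORT B =====
-- the inverted dict _INV of Source B
def pvInvB : PySem.Dict Int String :=
  ⟨[(915, "КР ДОП_3"), (917, "КР ДОП_3"), (918, "КР ДОП_3"), (919, "КР ДОП_3"),
    (12063, "КР 1"),
    (11896, "КР 2"),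
    (3587, "КР ДОП_4"), (7389, "КР ДОП_4"), (7553, "КР ДОП_4"), (8614, "КР ДОП_4"), (8732, "КР ДОП_4"),
    (9189, "КР ДОП_5"), (9190, "КР ДОП_5"), (9191, "КР ДОП_5"), (9192, "КР ДОП_5"), (9193, "КР ДОП_5"),
    (9194, "КР ДОП_5"), (9413, "КР ДОП_5"), (9441, "КР ДОП_5"), (9443, "КР ДОП_5"), (9453, "КР ДОП_5"),
    (9889, "КР ДОП_5"), (9899, "КР ДОП_5"),
    (10141, "КР ДОП_6"), (10240, "КР ДОП_6"), (11682, "КР ДОП_6"), (11729, "КР ДОП_6"),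
    (12873, "КР ДОП_8"),
    (16263, "КР ДОП_9")]⟩

def broker_channel_group_alt (cid : String) (day_number : Int) : String :=
  let group :=
    if PySem.Str.strIsdigit cid then
      -- int(cid): isdigit guarantees ofStr? succeeds; none is unreachable
      match PySem.Int.ofStr? cid with
      | some n => PySem.Dict.getD pvInvB n "КР ДОП_10"
      | none => "КР ДОП_10"
    else "КР ДОП_10"
  group ++ " (" ++ PySem.Int.toStr day_number ++ ").txt"

-- ===== PRECONDITION & SPEC =====
def Spec_broker_channel_group (cid : String) (day_number : Int) (out : String) : Prop := out = broker_channel_group_alt cid day_number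
instance (cid : String) (day_number : Int) (out : String) : Decidable (Spec_broker_channel_group cid day_number out) := by unfold Spec_broker_channel_group; infer_instance

-- ===== CLAIM (what is proved, stated in full; the proofs are below) =====
def Claim_equal_broker_channel_group : Prop := ∀ (cid : String) (day_number : Int), Dom_broker_channel_group cid day_number → Spec_broker_channel_group cid day_number (broker_channel_group cid day_number)

-- ===== LEMMAS AND PROOFS =====

-- when the loop condition is false at every entry (cid not all digits, or int(cid) fails),
-- every iteration skips and the default is returned
theorem pvLoopA_skip (cid : String) (d : Int) (t : List (String × List Int))
    (h : PySem.Str.strIsdigit cid = false ∨ PySem.Int.ofStr? cid = none) :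
    pvLoopA cid d t = "КР ДОП_10 (" ++ PySem.Int.toStr d ++ ").txt" := by
  simp only [PySem.Str.strIsdigit] at h
  induction t with
  | nil => rfl
  | cons p rest ih => cases p; rcases h with h | h <;> simp [pvLoopA, PySem.Str.strIsdigit, h, ih]

-- the scan of A's table agrees with B's inverted-dict probe for every integer n
theorem pvScan_eq_getD (cid : String) (d : Int) (n : Int)
    (hd : PySem.Str.strIsdigit cid = true) (ho : PySem.Int.ofStr? cid = some n) :
    pvLoopA cid d pvTableA = PySem.Dict.getD pvInvB n "КР ДОП_10" ++ " (" ++ PySem.Int.toStr d ++ ").txt" := by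
  simp only [PySem.Str.strIsdigit] at hd
  simp only [pvLoopA, pvTableA, PySem.Str.strIsdigit, hd, ho, Bool.true_and]
  rcases Decidable.em (n ∈ ([915, 917, 918, 919, 12063, 11896, 3587, 7389, 7553, 8614, 8732,
      9189, 9190, 9191, 9192, 9193, 9194, 9413, 9441, 9443, 9453, 9889, 9899,
      10141, 10240, 11682, 11729, 12873, 16263] : List Int)) with h | h
  · simp only [List.mem_cons, List.not_mem_nil, or_false] at h
    rcases h with rfl | rfl | rfl | rfl | rfl | rfl | rfl | rfl | rfl | rfl | rfl | rfl | rfl |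
      rfl | rfl | rfl | rfl | rfl | rfl | rfl | rfl | rfl | rfl | rfl | rfl | rfl | rfl |
      rfl | rfl <;>
      simp [pvInvB, PySem.Dict.getD, PySem.Dict.get?]
  · simp only [List.mem_cons, List.not_mem_nil, or_false, not_or] at h
    obtain ⟨h1, h2, h3, h4, h5, h6, h7, h8, h9, h10, h11, h12, h13, h14, h15, h16, h17, h18,
      h19, h20, h21, h22, h23, h24, h25, h26, h27, h28, h29⟩ := h
    have hget : PySem.Dict.get? pvInvB n = none := by
      simp [pvInvB, PySem.Dict.get?, List.find?_eq_none]
      omega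
    simp [PySem.Dict.getD, hget, h1, h2, h3, h4, h5, h6, h7, h8, h9, h10, h11, h12, h13, h14,
      h15, h16, h17, h18, h19, h20, h21, h22, h23, h24, h25, h26, h27, h28, h29]

-- ===== VERDICT (by name: the statement is the Claim_ definition above) =====
theorem broker_channel_group_spec : Claim_equal_broker_channel_group := by
  intro cid day_number _hdom
  have hlit : ("КР ДОП_10" ++ " (" : String) = "КР ДОП_10 (" := by decide
  unfold Spec_broker_channel_group broker_channel_group broker_channel_group_alt
  by_cases hd : PySem.Str.strIsdigit cid
  · have hd' : PySem.Chars.strIsdigit cid.toList = true := by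
      simpa [PySem.Str.strIsdigit] using hd
    cases ho : PySem.Int.ofStr? cid with
    | some n => rw [pvScan_eq_getD cid day_number n hd ho]; simp [hd']
    | none => simp [hd', hlit, pvLoopA_skip cid day_number pvTableA (Or.inr ho)]
  · have hd' : PySem.Chars.strIsdigit cid.toList = false := by
      simpa [PySem.Str.strIsdigit] using hd
    simp [hd', hlit, pvLoopA_skip cid day_number pvTableA (Or.inl (by simpa using hd))]
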